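-- pv_equiv track=rewrite | github.com/proman3419/AGH-WIET-INF-ASD-2021 | others/egz3_19_20/zad2.py | lis
-- ===== SOURCE A (Python) =====
-- def lis(A):
--   n = len(A)
--   # F[i] - dlugosc najwyzszej wiezy konczacej sie na A[i]
--   F = [1]*n
--   P = [-1]*n
--
--   for i in range(1, n):
--     for j in range(i):
--       if (A[j][0] <= A[i][0] and A[i][1] <= A[j][1]) and F[j] + 1 > F[i]:
--         F[i] = F[j] + 1
--         P[i] = j
--
--   max_h = 0
--   for i in range(n):
--     if max_h < F[i]:
--       max_h = F[i]
--
--   return max_h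
-- ===== SOURCE B (Python) =====
-- def lis(A):
--   # Level-set iteration (no DP arrays): S_k holds exactly the indices that end a
--   # valid chain of length >= k; repeatedly filter S to indices with a valid
--   # predecessor still in S; the number of nonempty levels is the answer.
--   n = len(A)
--   S = list(range(n))
--   h = 0
--   while S:
--     h += 1
--     S = [i for i in S
--          if any(j < i and A[j][0] <= A[i][0] and A[i][1] <= A[j][1] for j in S)]
--   return h
-- ===== Notes on version B (the rewrite author's own statement) =====
-- stated objective: alternative
-- what changed: B drops the per-index DP arrays (F, P) entirely and instead iterates level sets: starting from all indices, it repeatedly filters the set down to indices that still have a valid predecessor in the set, so after k rounds the set is exactly the indices ending a chain of length > k; the number of nonempty rounds is returned.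
import Mathlib
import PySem

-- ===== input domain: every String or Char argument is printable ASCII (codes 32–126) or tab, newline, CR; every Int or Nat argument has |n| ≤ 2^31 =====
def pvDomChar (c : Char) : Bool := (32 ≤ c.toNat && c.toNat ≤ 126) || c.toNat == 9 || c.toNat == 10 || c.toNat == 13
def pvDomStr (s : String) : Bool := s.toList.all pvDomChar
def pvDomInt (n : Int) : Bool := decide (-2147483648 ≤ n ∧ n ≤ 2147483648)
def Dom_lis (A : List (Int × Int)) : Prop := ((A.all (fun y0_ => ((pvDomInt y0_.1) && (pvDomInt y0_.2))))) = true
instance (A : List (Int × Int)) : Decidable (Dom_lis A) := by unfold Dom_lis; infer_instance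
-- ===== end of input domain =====

-- B replaces A's quadratic DP arrays (F, P) by level-set iteration: repeatedly
-- filter the index set to indices with a valid predecessor still in the set and
-- count the nonempty rounds; objective: alternative (no speed claim).

-- ===== PORT A =====
-- all indices produced by range(...) are nonnegative and in range, so A[i] is ported exactly
-- by List.getD i (0,0) on the Nat index, and list assignment by List.set.
def lis (A : List (Int × Int)) : Int :=
  let n := A.length
  let F : List Int := List.replicate n 1
  let P : List Int := List.replicate n (-1)
  let FP := ((List.range n).drop 1).foldl (fun (s : List Int × List Int) i =>
      (List.range i).foldl (fun (s : List Int × List Int) j =>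
        if ((A.getD j (0,0)).1 ≤ (A.getD i (0,0)).1 ∧ (A.getD i (0,0)).2 ≤ (A.getD j (0,0)).2)
            ∧ s.1.getD j 0 + 1 > s.1.getD i 0 then
          (s.1.set i (s.1.getD j 0 + 1), s.2.set i (Int.ofNat j))
        else s) s) (F, P)
  (List.range n).foldl (fun m i => if m < FP.1.getD i 0 then FP.1.getD i 0 else m) 0

-- ===== PORT B =====
-- one filtering round: keep the indices of S that have a valid predecessor in S
def lisStep (A : List (Int × Int)) (S : List ℕ) : List ℕ :=
  S.filter (fun i => S.any (fun j =>
    decide (j < i ∧ (A.getD j (0,0)).1 ≤ (A.getD i (0,0)).1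
      ∧ (A.getD i (0,0)).2 ≤ (A.getD j (0,0)).2)))

-- Source B's 'while S:' loop; fuel n = len(A) suffices since each round needs a strictly
-- longer chain and no chain exceeds n (proved below in lisLoop_eq / lis_alt_eq_maxEnd)
def lisLoop (A : List (Int × Int)) : ℕ → List ℕ → Int → Int
  | 0, _, h => h
  | Nat.succ f, S, h => if S = [] then h else lisLoop A f (lisStep A S) (h + 1)

def lis_alt (A : List (Int × Int)) : Int :=
  lisLoop A A.length (List.range A.length) 0

-- ===== PRECONDITION & SPEC =====
def Spec_lis (A : List (Int × Int)) (out : Int) : Prop := out = lis_alt A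
instance (A : List (Int × Int)) (out : Int) : Decidable (Spec_lis A out) := by unfold Spec_lis; infer_instance

-- ===== CLAIM (what is proved, stated in full; the proofs are below) =====
def Claim_equal_lis : Prop := ∀ (A : List (Int × Int)), Dom_lis A → Spec_lis A (lis A)

-- ===== LEMMAS AND PROOFS =====

-- the chaining condition between indices i and j (A[i] before A[j])
def edgeB (A : List (Int × Int)) (i j : ℕ) : Bool :=
  decide ((A.getD i (0,0)).1 ≤ (A.getD j (0,0)).1 ∧ (A.getD j (0,0)).2 ≤ (A.getD i (0,0)).2)

-- spec: length of the longest valid chain ending at index i (A's F[i])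
def chainEnd (A : List (Int × Int)) (i : ℕ) : Int :=
  ((List.range i).filter (fun j => edgeB A j i)).attach.foldl
    (fun m j => max m (chainEnd A j.1 + 1)) 1
termination_by i
decreasing_by
  have := List.mem_range.mp (List.mem_of_mem_filter j.2)
  omega

theorem chainEnd_eq (A : List (Int × Int)) (i : ℕ) :
    chainEnd A i = ((List.range i).filter (fun j => edgeB A j i)).foldl
      (fun m j => max m (chainEnd A j + 1)) 1 := by
  rw [chainEnd]
  exact List.foldl_attach (l := (List.range i).filter (fun j => edgeB A j i))
    (f := fun m j => max m (chainEnd A j + 1))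

-- generic fold-max facts
theorem fmax_ge_init {α : Type} (g : α → Int) (l : List α) (a : Int) :
    a ≤ l.foldl (fun m x => max m (g x)) a := by
  induction l generalizing a with
  | nil => simp
  | cons x t ih => exact le_trans (le_max_left _ _) (ih _)

theorem fmax_ge_mem {α : Type} (g : α → Int) (l : List α) (a : Int) {x : α} (hx : x ∈ l) :
    g x ≤ l.foldl (fun m y => max m (g y)) a := by
  induction l generalizing a with
  | nil => cases hx
  | cons y t ih =>
    rcases List.mem_cons.mp hx with h | h
    · subst h; exact le_trans (le_max_right _ _) (fmax_ge_init _ _ _)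
    · exact ih _ h

theorem fmax_le {α : Type} (g : α → Int) (l : List α) (a b : Int)
    (ha : a ≤ b) (h : ∀ x ∈ l, g x ≤ b) :
    l.foldl (fun m x => max m (g x)) a ≤ b := by
  induction l generalizing a with
  | nil => simpa
  | cons x t ih =>
    refine ih (max a (g x)) (max_le ha (h x List.mem_cons_self)) ?_
    exact fun y hy => h y (List.mem_cons_of_mem _ hy)

theorem fmax_attain {α : Type} (g : α → Int) (l : List α) (a : Int) :
    l.foldl (fun m x => max m (g x)) a = a ∨ ∃ x ∈ l, l.foldl (fun m x => max m (g x)) a = g x := by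
  induction l generalizing a with
  | nil => left; rfl
  | cons y t ih =>
    rcases ih (max a (g y)) with h | ⟨x, hx, h⟩
    · rcases max_cases a (g y) with ⟨he, _⟩ | ⟨he, _⟩
      · left; simpa [he] using h
      · right; exact ⟨y, List.mem_cons_self, by simpa [he] using h⟩
    · right; exact ⟨x, List.mem_cons_of_mem _ hx, h⟩

theorem chainEnd_ge_one (A : List (Int × Int)) (i : ℕ) : 1 ≤ chainEnd A i := by
  rw [chainEnd_eq]; exact fmax_ge_init _ _ _

theorem chainEnd_succ_le (A : List (Int × Int)) {i j : ℕ} (hij : i < j)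
    (he : edgeB A i j = true) : chainEnd A i + 1 ≤ chainEnd A j := by
  rw [chainEnd_eq A j]
  exact fmax_ge_mem (fun k => chainEnd A k + 1) _ 1
    (List.mem_filter.mpr ⟨List.mem_range.mpr hij, he⟩)

theorem chainEnd_le (A : List (Int × Int)) : ∀ i : ℕ, chainEnd A i ≤ (i : Int) + 1 := by
  intro i
  induction i using Nat.strong_induction_on with
  | _ i ih =>
    rw [chainEnd_eq]
    refine fmax_le _ _ _ _ (by omega) (fun j hj => ?_)
    have hji := List.mem_range.mp (List.mem_of_mem_filter hj)
    have := ih j hji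
    omega

-- the maximum of chainEnd over all indices (the value both programs compute)
def maxEnd (A : List (Int × Int)) : Int :=
  (List.range A.length).foldl (fun m i => max m (chainEnd A i)) 0

theorem maxEnd_nonneg (A : List (Int × Int)) : 0 ≤ maxEnd A := fmax_ge_init _ _ _

theorem maxEnd_le_len (A : List (Int × Int)) : maxEnd A ≤ (A.length : Int) := by
  refine fmax_le _ _ _ _ (by omega) (fun i hi => ?_)
  have h1 := List.mem_range.mp hi
  have h2 := chainEnd_le A i
  omega

theorem le_maxEnd (A : List (Int × Int)) {i : ℕ} (hi : i < A.length) :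
    chainEnd A i ≤ maxEnd A :=
  fmax_ge_mem (chainEnd A) _ 0 (List.mem_range.mpr hi)

theorem maxEnd_attained (A : List (Int × Int)) {k : Int} (hk1 : 1 ≤ k) (hk : k ≤ maxEnd A) :
    ∃ i, i < A.length ∧ k ≤ chainEnd A i := by
  rcases fmax_attain (chainEnd A) (List.range A.length) 0 with h | ⟨i, hi, h⟩
  · exfalso; unfold maxEnd at hk; omega
  · exact ⟨i, List.mem_range.mp hi, by unfold maxEnd at hk; omega⟩

-- small utilities for A's fold state
theorem if_lt_eq_max (m x : Int) : (if m < x then x else m) = max m x := by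
  simp only [max_def]; split_ifs <;> omega

theorem step2_eq_max (P Q : Prop) [Decidable P] [Decidable Q] (m v : Int) :
    (if (P ∧ Q) ∧ v > m then v else m) = if P ∧ Q then max m v else m := by
  by_cases h : P ∧ Q
  · simp only [h, true_and, if_true, max_def]; split_ifs <;> omega
  · have h2 : ¬((P ∧ Q) ∧ v > m) := fun hc => h hc.1
    simp only [if_neg h, if_neg h2]

theorem getD_set_zero (l : List Int) (i k : ℕ) (v : Int) :
    (l.set i v).getD k 0 = if i = k ∧ i < l.length then v else l.getD k 0 := by
  simp only [List.getD_eq_getElem?_getD, List.getElem?_set]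
  by_cases h1 : i = k
  · subst h1
    by_cases h2 : i < l.length
    · simp [h2]
    · simp [h2]
  · rw [if_neg (fun hc : i = k ∧ i < l.length => h1 hc.1)]
    simp [h1]

-- the value A's F array holds at position k once outer index i has been processed
def FVal (A : List (Int × Int)) (i k : ℕ) : Int := if k < i then chainEnd A k else 1

theorem chainEnd_zero (A : List (Int × Int)) : chainEnd A 0 = 1 := by
  rw [chainEnd_eq]; simp

theorem innerfoldA_eq (A : List (Int × Int)) (i : ℕ) :
    (List.range i).foldl (fun m j =>
      if ((A.getD j (0,0)).1 ≤ (A.getD i (0,0)).1 ∧ (A.getD i (0,0)).2 ≤ (A.getD j (0,0)).2)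
          ∧ chainEnd A j + 1 > m then chainEnd A j + 1 else m) 1 = chainEnd A i := by
  rw [chainEnd_eq]
  rw [PySem.List.foldl_congr_mem _ _
      (fun m j => if ((A.getD j (0,0)).1 ≤ (A.getD i (0,0)).1 ∧ (A.getD i (0,0)).2 ≤ (A.getD j (0,0)).2)
        then max m (chainEnd A j + 1) else m) _
      (fun m j _ => step2_eq_max _ _ _ _)]
  rw [PySem.List.foldl_ite_eq_foldl_filter]
  rfl

theorem innerA (A : List (Int × Int)) {i : ℕ} (hin : i < A.length) :
    ∀ (l : List ℕ) (s : List Int × List Int) (c : Int),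
      (∀ j ∈ l, j < i) → s.1.length = A.length →
      (∀ k, k < A.length → s.1.getD k 0 = if k = i then c else FVal A i k) →
      ((l.foldl (fun (s : List Int × List Int) j =>
        if ((A.getD j (0,0)).1 ≤ (A.getD i (0,0)).1 ∧ (A.getD i (0,0)).2 ≤ (A.getD j (0,0)).2)
            ∧ s.1.getD j 0 + 1 > s.1.getD i 0 then
          (s.1.set i (s.1.getD j 0 + 1), s.2.set i (Int.ofNat j))
        else s) s).1.length = A.length ∧
      ∀ k, k < A.length →
        (l.foldl (fun (s : List Int × List Int) j =>
          if ((A.getD j (0,0)).1 ≤ (A.getD i (0,0)).1 ∧ (A.getD i (0,0)).2 ≤ (A.getD j (0,0)).2)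
              ∧ s.1.getD j 0 + 1 > s.1.getD i 0 then
            (s.1.set i (s.1.getD j 0 + 1), s.2.set i (Int.ofNat j))
          else s) s).1.getD k 0 =
          if k = i then l.foldl (fun m j =>
            if ((A.getD j (0,0)).1 ≤ (A.getD i (0,0)).1 ∧ (A.getD i (0,0)).2 ≤ (A.getD j (0,0)).2)
                ∧ chainEnd A j + 1 > m then chainEnd A j + 1 else m) c
          else FVal A i k) := by
  intro l
  induction l with
  | nil => intro s c _ h2 h3; exact ⟨h2, h3⟩
  | cons j t ih =>
    intro s c hjl hlen hget
    have hji : j < i := hjl j List.mem_cons_self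
    have hjn : j < A.length := lt_trans hji hin
    have hsj : s.1.getD j 0 = chainEnd A j := by
      rw [hget j hjn, if_neg (by omega), FVal, if_pos hji]
    have hsi : s.1.getD i 0 = c := by rw [hget i hin, if_pos rfl]
    simp only [List.foldl_cons]
    rw [hsj, hsi]
    by_cases hc : ((A.getD j (0,0)).1 ≤ (A.getD i (0,0)).1 ∧ (A.getD i (0,0)).2 ≤ (A.getD j (0,0)).2)
        ∧ chainEnd A j + 1 > c
    · rw [if_pos hc, if_pos hc]
      refine ih _ _ (fun x hx => hjl x (List.mem_cons_of_mem _ hx)) (by simp [hlen]) ?_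
      intro k hk
      rw [getD_set_zero]
      by_cases hk2 : k = i
      · rw [if_pos hk2, if_pos ⟨hk2.symm, by omega⟩]
      · rw [if_neg hk2, if_neg (fun hc2 : i = k ∧ i < s.1.length => hk2 hc2.1.symm), hget k hk, if_neg hk2]
    · rw [if_neg hc, if_neg hc]
      exact ih _ _ (fun x hx => hjl x (List.mem_cons_of_mem _ hx)) hlen hget

theorem outerA (A : List (Int × Int)) : ∀ i, i ≤ A.length →
    (((List.range i).drop 1).foldl (fun (s : List Int × List Int) i =>
      (List.range i).foldl (fun (s : List Int × List Int) j =>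
        if ((A.getD j (0,0)).1 ≤ (A.getD i (0,0)).1 ∧ (A.getD i (0,0)).2 ≤ (A.getD j (0,0)).2)
            ∧ s.1.getD j 0 + 1 > s.1.getD i 0 then
          (s.1.set i (s.1.getD j 0 + 1), s.2.set i (Int.ofNat j))
        else s) s) (List.replicate A.length 1, List.replicate A.length (-1))).1.length = A.length ∧
    ∀ k, k < A.length →
    (((List.range i).drop 1).foldl (fun (s : List Int × List Int) i =>
      (List.range i).foldl (fun (s : List Int × List Int) j =>
        if ((A.getD j (0,0)).1 ≤ (A.getD i (0,0)).1 ∧ (A.getD i (0,0)).2 ≤ (A.getD j (0,0)).2)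
            ∧ s.1.getD j 0 + 1 > s.1.getD i 0 then
          (s.1.set i (s.1.getD j 0 + 1), s.2.set i (Int.ofNat j))
        else s) s) (List.replicate A.length 1, List.replicate A.length (-1))).1.getD k 0 = FVal A i k := by
  intro i
  induction i with
  | zero =>
    intro _
    refine ⟨by simp, fun k hk => ?_⟩
    simp only [List.range_zero, List.drop_nil, List.foldl_nil]
    rw [List.getD_replicate _ hk, FVal, if_neg (by omega)]
  | succ i ihi =>
    intro h
    by_cases hi0 : i = 0
    · subst hi0
      refine ⟨by simp, fun k hk => ?_⟩
      simp only [show (List.range 1).drop 1 = ([] : List ℕ) from rfl, List.foldl_nil]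
      rw [List.getD_replicate _ hk, FVal]
      by_cases hk1 : k < 1
      · rw [if_pos hk1, show k = 0 by omega, chainEnd_zero]
      · rw [if_neg hk1]
    · have h1 : 1 ≤ i := by omega
      have hin : i < A.length := by omega
      obtain ⟨L1, L2⟩ := ihi (by omega)
      rw [List.range_succ, List.drop_append_of_le_length (by simpa using h1), List.foldl_append]
      simp only [List.foldl_cons, List.foldl_nil]
      have hinner := innerA A hin (List.range i) _ 1
        (fun j hj => List.mem_range.mp hj) L1
        (fun k hk => by
          rw [L2 k hk]
          by_cases hk2 : k = i
          · rw [if_pos hk2, hk2, FVal, if_neg (by omega)]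
          · rw [if_neg hk2])
      refine ⟨hinner.1, fun k hk => ?_⟩
      rw [hinner.2 k hk, innerfoldA_eq]
      by_cases hk2 : k = i
      · rw [if_pos hk2, hk2, FVal, if_pos (by omega)]
      · rw [if_neg hk2, FVal, FVal]
        by_cases h3 : k < i
        · rw [if_pos h3, if_pos (by omega)]
        · rw [if_neg h3, if_neg (by omega)]

-- A's port computes the max of chainEnd
theorem lis_eq_maxEnd (A : List (Int × Int)) : lis A = maxEnd A := by
  obtain ⟨hL, hget⟩ := outerA A A.length le_rfl
  simp only [lis, maxEnd]
  refine PySem.List.foldl_congr_mem _ _ _ _ (fun m i => ?_)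
  intro hi
  rw [hget i (List.mem_range.mp hi), FVal, if_pos (List.mem_range.mp hi), if_lt_eq_max]

-- ---- B side: level sets ----

-- the level set after k-1 rounds: indices ending a chain of length ≥ k
def Sk (A : List (Int × Int)) (k : Int) : List ℕ :=
  (List.range A.length).filter (fun i => decide (k ≤ chainEnd A i))

theorem Sk_one (A : List (Int × Int)) : Sk A 1 = List.range A.length := by
  unfold Sk
  rw [List.filter_eq_self]
  exact fun i _ => decide_eq_true (chainEnd_ge_one A i)

theorem Sk_nil_iff (A : List (Int × Int)) {k : Int} (hk : 1 ≤ k) :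
    Sk A k = [] ↔ maxEnd A < k := by
  constructor
  · intro h
    by_contra hc
    obtain ⟨i, hi, hki⟩ := maxEnd_attained A hk (by omega)
    have : i ∈ Sk A k :=
      List.mem_filter.mpr ⟨List.mem_range.mpr hi, decide_eq_true hki⟩
    rw [h] at this; cases this
  · intro h
    unfold Sk
    rw [List.filter_eq_nil_iff]
    intro i hi
    have h1 := le_maxEnd A (List.mem_range.mp hi)
    simp only [decide_eq_true_eq]
    omega

-- one filtering round maps level k to level k+1
theorem step_Sk (A : List (Int × Int)) {k : Int} (hk : 1 ≤ k) :
    lisStep A (Sk A k) = Sk A (k + 1) := by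
  unfold lisStep Sk
  rw [List.filter_filter]
  refine List.filter_congr (fun i hi => ?_)
  have hin := List.mem_range.mp hi
  rw [Bool.eq_iff_iff]
  simp only [List.any_eq_true, List.mem_filter, List.mem_range, decide_eq_true_eq,
    Bool.and_eq_true]
  constructor
  · rintro ⟨⟨j, ⟨⟨hjn, hjc⟩, hji, hx, hy⟩⟩, _⟩
    have he : edgeB A j i = true := decide_eq_true ⟨hx, hy⟩
    have := chainEnd_succ_le A hji he
    omega
  · intro h
    have h2 : (2:Int) ≤ chainEnd A i := by omega
    rcases fmax_attain (fun j => chainEnd A j + 1)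
        ((List.range i).filter (fun j => edgeB A j i)) 1 with h0 | ⟨j, hj, hje⟩
    · rw [chainEnd_eq] at h2; omega
    · have hjm := List.mem_filter.mp hj
      have hji := List.mem_range.mp hjm.1
      have hce : chainEnd A i = chainEnd A j + 1 := by rw [chainEnd_eq]; exact hje
      have hedge := of_decide_eq_true hjm.2
      exact ⟨⟨j, ⟨⟨by omega, by omega⟩, hji, hedge.1, hedge.2⟩⟩, by omega⟩

theorem lisLoop_eq (A : List (Int × Int)) : ∀ (f : ℕ) (k h : Int), 1 ≤ k →
    k - 1 ≤ maxEnd A → maxEnd A ≤ k - 1 + (f : Int) →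
    lisLoop A f (Sk A k) h = h + (maxEnd A - (k - 1)) := by
  intro f
  induction f with
  | zero => intro k h hk h1 h2; simp only [lisLoop]; omega
  | succ f ih =>
    intro k h hk h1 h2
    simp only [lisLoop]
    by_cases hS : Sk A k = []
    · rw [if_pos hS]
      have := (Sk_nil_iff A hk).mp hS
      omega
    · rw [if_neg hS]
      have hge : k ≤ maxEnd A := by
        by_contra hc
        exact hS ((Sk_nil_iff A hk).mpr (by omega))
      rw [step_Sk A hk, ih (k+1) (h+1) (by omega) (by omega) (by push_cast at h2 ⊢; omega)]
      omega

theorem lis_alt_eq_maxEnd (A : List (Int × Int)) : lis_alt A = maxEnd A := by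
  unfold lis_alt
  rw [← Sk_one A, lisLoop_eq A A.length 1 0 le_rfl (by have := maxEnd_nonneg A; omega)
    (by have := maxEnd_le_len A; omega)]
  omega

-- ===== VERDICT (by name: the statement is the Claim_ definition above) =====
theorem lis_spec : Claim_equal_lis := by
  intro A _
  unfold Spec_lis
  rw [lis_eq_maxEnd, lis_alt_eq_maxEnd]
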